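-- pv_equiv track=rewrite | github.com/Quirinodsg/CorujaMonitor | ai-agent/aiops_engine.py | _calculate_group_severity
-- ===== SOURCE A (Python) =====
-- from typing import Dict, Any, List, Optional, Tuple
--
-- def _calculate_group_severity(incidents: List[Dict[str, Any]]) -> str:
--     """Calculate overall severity of incident group"""
--     severities = [inc.get('severity', 'warning') for inc in incidents]
--
--     if 'critical' in severities:
--         return 'critical'
--     elif 'warning' in severities:
--         return 'warning'
--     else:
--         return 'info'
-- ===== SOURCE B (Python) =====
-- def _calculate_group_severity(incidents):
--     """Calculate overall severity of incident group (single max-reduction)."""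
--     rank = {'critical': 2, 'warning': 1}
--     best = max((rank.get(inc.get('severity', 'warning'), 0) for inc in incidents), default=0)
--     return 'critical' if best == 2 else 'warning' if best == 1 else 'info'
-- ===== Notes on version B (the rewrite author's own statement) =====
-- stated objective: idiomatic
-- what changed: Replaces building a severities list plus two membership scans with a single max-reduction over a numeric severity rank, mapped back to a label at the end.
import Mathlib
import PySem

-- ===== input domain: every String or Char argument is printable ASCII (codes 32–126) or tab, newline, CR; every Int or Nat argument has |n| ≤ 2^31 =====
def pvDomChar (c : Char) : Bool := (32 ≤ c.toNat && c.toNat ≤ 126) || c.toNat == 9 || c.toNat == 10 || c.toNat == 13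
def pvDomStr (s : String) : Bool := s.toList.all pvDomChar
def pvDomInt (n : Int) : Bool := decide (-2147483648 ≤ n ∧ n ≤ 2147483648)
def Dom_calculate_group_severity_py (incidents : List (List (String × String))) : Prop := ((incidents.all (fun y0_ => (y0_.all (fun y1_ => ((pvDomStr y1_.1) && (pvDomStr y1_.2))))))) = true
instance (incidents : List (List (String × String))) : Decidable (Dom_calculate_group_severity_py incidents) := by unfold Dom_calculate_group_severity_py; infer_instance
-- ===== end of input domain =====

-- ===== PORT A =====
-- list of severities, then two membership scans (literal port of A)
def calculate_group_severity_py (incidents : List (List (String × String))) : String :=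
  let severities := incidents.map (fun inc => (PySem.Dict.mk inc).getD "severity" "warning")
  if severities.contains "critical" then "critical"
  else if severities.contains "warning" then "warning"
  else "info"

-- ===== PORT B =====
-- B keeps a running maximum of a numeric severity rank, mapped back at the end.
def pvRank (s : String) : Int :=
  if s = "critical" then 2 else if s = "warning" then 1 else 0

def calculate_group_severity_py_alt (incidents : List (List (String × String))) : String :=
  let best := incidents.foldl
    (fun acc inc => max acc (pvRank ((PySem.Dict.mk inc).getD "severity" "warning"))) 0
  if best = 2 then "critical" else if best = 1 then "warning" else "info"

-- ===== PRECONDITION & SPEC =====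
def Spec_calculate_group_severity_py (incidents : List (List (String × String))) (out : String) : Prop := out = calculate_group_severity_py_alt incidents
instance (incidents : List (List (String × String))) (out : String) : Decidable (Spec_calculate_group_severity_py incidents out) := by unfold Spec_calculate_group_severity_py; infer_instance

-- ===== CLAIM (what is proved, stated in full; the proofs are below) =====
def Claim_equal_calculate_group_severity_py : Prop := ∀ (incidents : List (List (String × String))), Dom_calculate_group_severity_py incidents → Spec_calculate_group_severity_py incidents (calculate_group_severity_py incidents)

-- ===== LEMMAS AND PROOFS =====
theorem pvRank_nonneg (s : String) : 0 ≤ pvRank s := by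
  unfold pvRank; split_ifs <;> omega

theorem pvFold_acc {α : Type} (f : α → String) (l : List α) (acc : Int) (hacc : 0 ≤ acc) :
    l.foldl (fun a s => max a (pvRank (f s))) acc
      = max acc (l.foldl (fun a s => max a (pvRank (f s))) 0) := by
  induction l generalizing acc with
  | nil => simp; omega
  | cons h t ih =>
    simp only [List.foldl_cons]
    have hr := pvRank_nonneg (f h)
    rw [ih (max acc (pvRank (f h))) (by omega), ih (max 0 (pvRank (f h))) (by omega)]
    omega

theorem pvFold_eq {α : Type} (f : α → String) (l : List α) :
    l.foldl (fun a s => max a (pvRank (f s))) 0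
      = if (l.map f).contains "critical" then 2
        else if (l.map f).contains "warning" then 1 else 0 := by
  induction l with
  | nil => simp
  | cons h t ih =>
    simp only [List.foldl_cons, List.map_cons, List.contains_cons]
    rw [pvFold_acc f t (max 0 (pvRank (f h))) (le_max_left 0 _), ih]
    by_cases hc : f h = "critical"
    · rw [hc]; simp [pvRank]
      split_ifs <;> omega
    · by_cases hw : f h = "warning"
      · rw [hw]
        have h1 : pvRank "warning" = 1 := by decide
        have h2 : ("critical" == "warning") = false := by decide
        simp [h1, h2]
        split_ifs <;> omega
      · have h0 : pvRank (f h) = 0 := by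
          unfold pvRank; rw [if_neg hc, if_neg hw]
        have e1 : ("critical" == f h) = false := by
          simp [beq_iff_eq]; exact fun e => hc e.symm
        have e2 : ("warning" == f h) = false := by
          simp [beq_iff_eq]; exact fun e => hw e.symm
        simp [h0, e1, e2]
        split_ifs <;> omega

-- ===== VERDICT (by name: the statement is the Claim_ definition above) =====
theorem calculate_group_severity_py_spec : Claim_equal_calculate_group_severity_py := by
  intro incidents _
  unfold Spec_calculate_group_severity_py calculate_group_severity_py calculate_group_severity_py_alt
  rw [pvFold_eq (fun inc => (PySem.Dict.mk inc).getD "severity" "warning") incidents]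
  cases hc : (incidents.map (fun inc => (PySem.Dict.mk inc).getD "severity" "warning")).contains "critical" <;>
    cases hw : (incidents.map (fun inc => (PySem.Dict.mk inc).getD "severity" "warning")).contains "warning" <;>
      simp only [hc, hw] <;> simp
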